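-- pv_equiv track=rewrite | github.com/Maxwel-2024/apis-na-pratica | api-de-tempo-evoluido.py | _traduzir_mensagem_api
-- ===== SOURCE A (Python) =====
-- def _traduzir_mensagem_api(msg: str) -> str:
--     if not msg:
--         return "Erro na API."
--
--     m = msg.strip().lower()
--
--     # Mapeamentos comuns (mensagens da WeatherAPI e similares)
--     if "no matching location" in m or "location not found" in m:
--         return "Cidade não encontrada."
--     if "invalid api key" in m or "api key" in m and "invalid" in m:
--         return "Chave de API inválida."
--     if "no api key" in m or "key" in m and "missing" in m:
--         return "Chave de API ausente."
--     if "quota" in m or "rate limit" in m or "exceed" in m: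
--         return "Limite de requisições excedido. Tente novamente mais tarde."
--     if "invalid request" in m or "bad request" in m:
--         return "Requisição inválida."
--
--     # Se a mensagem já estiver em português, retornar capitalizada
--     if any(x in m for x in ["cidade", "chave", "limite", "requis" ]):
--         return msg.capitalize()
--
--     # Caso não reconheça, fornecer uma tradução genérica mantendo a mensagem original
--     return f"Erro: {msg}"
-- ===== SOURCE B (Python) =====
-- # Single left-to-right multi-pattern scan: every keyword occurrence is collected
-- # into a hit-set in one pass over the message, then the category is decided by
-- # pure membership logic on that set (using that "invalid api key" already implies
-- # "api key" and "invalid", so that redundant test disappears).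
-- _KEYWORDS = ("no matching location", "location not found", "api key", "invalid",
--              "no api key", "key", "missing", "quota", "rate limit", "exceed",
--              "invalid request", "bad request", "cidade", "chave", "limite", "requis")
--
--
-- def _traduzir_mensagem_api(msg: str) -> str:
--     if not msg:
--         return "Erro na API."
--     m = msg.strip().lower()
--     hits = set()
--     for i in range(len(m)):
--         for w in _KEYWORDS:
--             if m.startswith(w, i):
--                 hits.add(w)
--     if "no matching location" in hits or "location not found" in hits:
--         return "Cidade não encontrada."
--     if "api key" in hits and "invalid" in hits:
--         return "Chave de API inválida."
--     if "no api key" in hits or ("key" in hits and "missing" in hits):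
--         return "Chave de API ausente."
--     if "quota" in hits or "rate limit" in hits or "exceed" in hits:
--         return "Limite de requisições excedido. Tente novamente mais tarde."
--     if "invalid request" in hits or "bad request" in hits:
--         return "Requisição inválida."
--     if "cidade" in hits or "chave" in hits or "limite" in hits or "requis" in hits:
--         return msg.capitalize()
--     return f"Erro: {msg}"
-- ===== Notes on version B (the rewrite author's own statement) =====
-- stated objective: alternative
-- what changed: Instead of A's per-branch repeated substring searches with and/or chains, B makes one left-to-right scan over the normalized message collecting every keyword occurrence into a hit set, then decides the category by pure membership logic on that set, also dropping the redundant whole-phrase test in the invalid-key branch because that phrase as a substring already implies both of its two sub-keywords.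
import Mathlib
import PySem

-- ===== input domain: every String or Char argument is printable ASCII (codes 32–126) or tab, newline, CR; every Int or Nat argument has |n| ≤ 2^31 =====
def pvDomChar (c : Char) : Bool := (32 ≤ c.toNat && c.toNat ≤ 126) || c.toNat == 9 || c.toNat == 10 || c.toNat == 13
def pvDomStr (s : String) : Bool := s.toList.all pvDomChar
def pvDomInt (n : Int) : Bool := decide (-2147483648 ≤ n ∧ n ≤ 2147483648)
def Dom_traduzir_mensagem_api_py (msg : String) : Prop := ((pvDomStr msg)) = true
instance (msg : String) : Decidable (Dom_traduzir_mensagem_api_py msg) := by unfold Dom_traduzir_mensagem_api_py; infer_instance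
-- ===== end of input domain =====

-- B replaces A's per-branch repeated substring searches with one left-to-right
-- multi-pattern scan collecting all keyword hits into a set, then pure membership
-- logic on that set (objective: alternative, same behaviour).

-- shared helper: Python str.capitalize(), exact on the ASCII domain (first char uppercased, rest lowercased)
def pyCapitalize (s : String) : String :=
  match s.toList with
  | [] => s
  | c :: rest => String.ofList (PySem.Chars.upperChar c :: PySem.Chars.lower rest)

-- ===== PORT A =====
def traduzir_mensagem_api_py (msg : String) : String :=
  if msg = "" then "Erro na API."
  else
    let m := PySem.Str.lower (PySem.Str.strip msg)
    if PySem.Str.isIn "no matching location" m || PySem.Str.isIn "location not found" m then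
      "Cidade não encontrada."
    else if PySem.Str.isIn "invalid api key" m ||
            (PySem.Str.isIn "api key" m && PySem.Str.isIn "invalid" m) then
      "Chave de API inválida."
    else if PySem.Str.isIn "no api key" m ||
            (PySem.Str.isIn "key" m && PySem.Str.isIn "missing" m) then
      "Chave de API ausente."
    else if PySem.Str.isIn "quota" m || PySem.Str.isIn "rate limit" m ||
            PySem.Str.isIn "exceed" m then
      "Limite de requisições excedido. Tente novamente mais tarde."
    else if PySem.Str.isIn "invalid request" m || PySem.Str.isIn "bad request" m then
      "Requisição inválida."
    else if (["cidade", "chave", "limite", "requis"].any fun x => PySem.Str.isIn x m) then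
      pyCapitalize msg
    else
      "Erro: " ++ msg

-- ===== PORT B =====
def pvKeywords : List String :=
  ["no matching location", "location not found", "api key", "invalid",
   "no api key", "key", "missing", "quota", "rate limit", "exceed",
   "invalid request", "bad request", "cidade", "chave", "limite", "requis"]

-- the inner 'for w in _KEYWORDS' loop at one position i (suff = m[i:])
def pvStep (suff : List Char) (hits : PySem.Set String) : PySem.Set String :=
  pvKeywords.foldl
    (fun h w => if PySem.Chars.startswith suff w.toList then PySem.Set.add h w else h) hits

-- the outer 'for i in range(len(m))' loop, as recursion over the suffixes of m
def pvScan (s : List Char) (hits : PySem.Set String) : PySem.Set String :=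
  match s with
  | [] => hits
  | _ :: rest => pvScan rest (pvStep s hits)

def traduzir_mensagem_api_py_alt (msg : String) : String :=
  if msg = "" then "Erro na API."
  else
    let m := PySem.Str.lower (PySem.Str.strip msg)
    let hits := pvScan m.toList PySem.Set.empty
    if PySem.Set.contains hits "no matching location" ||
       PySem.Set.contains hits "location not found" then
      "Cidade não encontrada."
    else if PySem.Set.contains hits "api key" && PySem.Set.contains hits "invalid" then
      "Chave de API inválida."
    else if PySem.Set.contains hits "no api key" ||
            (PySem.Set.contains hits "key" && PySem.Set.contains hits "missing") then
      "Chave de API ausente."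
    else if PySem.Set.contains hits "quota" || PySem.Set.contains hits "rate limit" ||
            PySem.Set.contains hits "exceed" then
      "Limite de requisições excedido. Tente novamente mais tarde."
    else if PySem.Set.contains hits "invalid request" ||
            PySem.Set.contains hits "bad request" then
      "Requisição inválida."
    else if PySem.Set.contains hits "cidade" || PySem.Set.contains hits "chave" ||
            PySem.Set.contains hits "limite" || PySem.Set.contains hits "requis" then
      pyCapitalize msg
    else
      "Erro: " ++ msg

-- ===== PRECONDITION & SPEC =====
def Spec_traduzir_mensagem_api_py (msg : String) (out : String) : Prop := out = traduzir_mensagem_api_py_alt msg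
instance (msg : String) (out : String) : Decidable (Spec_traduzir_mensagem_api_py msg out) := by unfold Spec_traduzir_mensagem_api_py; infer_instance

-- ===== CLAIM =====
def Claim_equal_traduzir_mensagem_api_py : Prop := ∀ (msg : String), Dom_traduzir_mensagem_api_py msg → Spec_traduzir_mensagem_api_py msg (traduzir_mensagem_api_py msg)

-- ===== LEMMAS AND PROOFS =====

lemma mem_pvStep (suff : List Char) (acc : PySem.Set String) (w : String) :
    w ∈ pvStep suff acc ↔
      w ∈ acc ∨ (w ∈ pvKeywords ∧ PySem.Chars.startswith suff w.toList = true) := by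
  unfold pvStep
  generalize pvKeywords = ks
  induction ks generalizing acc with
  | nil => simp
  | cons k rest ih =>
    simp only [List.foldl_cons, ih, List.mem_cons]
    split_ifs with h
    · simp [PySem.Set.mem_add]
      constructor
      · rintro ((h1 | rfl) | h2)
        · exact Or.inl h1
        · exact Or.inr ⟨Or.inl rfl, h⟩
        · exact Or.inr ⟨Or.inr h2.1, h2.2⟩
      · rintro (h1 | ⟨(rfl | hm), hs⟩)
        · exact Or.inl (Or.inl h1)
        · exact Or.inl (Or.inr rfl)
        · exact Or.inr ⟨hm, hs⟩
    · constructor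
      · rintro (h1 | h2)
        · exact Or.inl h1
        · exact Or.inr ⟨Or.inr h2.1, h2.2⟩
      · rintro (h1 | ⟨(rfl | hm), hs⟩)
        · exact Or.inl h1
        · exact absurd hs (by simp [h])
        · exact Or.inr ⟨hm, hs⟩

lemma mem_pvScan (s : List Char) (acc : PySem.Set String) (w : String)
    (hw : w.toList ≠ []) :
    w ∈ pvScan s acc ↔
      w ∈ acc ∨ (w ∈ pvKeywords ∧ PySem.Chars.isIn w.toList s = true) := by
  induction s generalizing acc with
  | nil =>
    simp only [pvScan]
    constructor
    · exact Or.inl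
    · rintro (h | ⟨_, hin⟩)
      · exact h
      · rw [PySem.Chars.isIn_iff_infix] at hin
        exact absurd (List.eq_nil_of_infix_nil hin) hw
  | cons c rest ih =>
    simp only [pvScan, ih, mem_pvStep]
    have hcons : PySem.Chars.isIn w.toList (c :: rest) = true ↔
        PySem.Chars.startswith (c :: rest) w.toList = true ∨
        PySem.Chars.isIn w.toList rest = true := by
      rw [PySem.Chars.isIn_iff_infix, PySem.Chars.isIn_iff_infix,
        PySem.Chars.startswith_iff, List.infix_cons_iff]
    rw [hcons]
    tauto

-- every keyword is non-empty, so pvScan computes exactly substring membership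
lemma contains_pvScan (m : String) (w : String) (hk : w ∈ pvKeywords) :
    PySem.Set.contains (pvScan m.toList PySem.Set.empty) w = PySem.Str.isIn w m := by
  have hw : w.toList ≠ [] := by
    fin_cases hk <;> decide
  by_cases h : PySem.Str.isIn w m = true
  · have := (PySem.Str.isIn_iff_infix _ _).mp h
    have hmem : w ∈ pvScan m.toList PySem.Set.empty := by
      rw [mem_pvScan _ _ _ hw]
      exact Or.inr ⟨hk, (PySem.Chars.isIn_iff_infix _ _).mpr this⟩
    rw [h]
    simpa [PySem.Set.contains] using hmem
  · have hnmem : w ∉ pvScan m.toList PySem.Set.empty := by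
      rw [mem_pvScan _ _ _ hw]
      rintro (h1 | ⟨_, h2⟩)
      · simp [PySem.Set.empty] at h1
      · exact h (by rw [PySem.Str.isIn_iff_infix]; exact (PySem.Chars.isIn_iff_infix _ _).mp h2)
    simp only [Bool.not_eq_true] at h
    rw [h]
    simpa [PySem.Set.contains] using hnmem

-- "invalid api key" in m already forces "api key" in m and "invalid" in m
lemma iak_implies (m : String) (h : PySem.Str.isIn "invalid api key" m = true) :
    PySem.Str.isIn "api key" m = true ∧ PySem.Str.isIn "invalid" m = true := by
  rw [PySem.Str.isIn_iff_infix] at h ⊢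
  rw [PySem.Str.isIn_iff_infix]
  constructor
  · exact List.IsInfix.trans (by decide) h
  · exact List.IsInfix.trans (by decide) h

-- ===== VERDICT =====
theorem traduzir_mensagem_api_py_spec : Claim_equal_traduzir_mensagem_api_py := by
  intro msg _
  unfold Spec_traduzir_mensagem_api_py traduzir_mensagem_api_py traduzir_mensagem_api_py_alt
  by_cases h0 : msg = ""
  · simp [h0]
  · simp only [h0, if_false]
    have hc := fun w hk => contains_pvScan (PySem.Str.lower (PySem.Str.strip msg)) w hk
    simp only [pvKeywords, List.mem_cons, List.not_mem_nil, or_false] at hc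
    rw [hc _ (by tauto), hc _ (by tauto), hc _ (by tauto), hc _ (by tauto),
        hc _ (by tauto), hc _ (by tauto), hc _ (by tauto), hc _ (by tauto),
        hc _ (by tauto), hc _ (by tauto), hc _ (by tauto), hc _ (by tauto),
        hc _ (by tauto), hc _ (by tauto), hc _ (by tauto), hc _ (by tauto)]
    have hb2 : (PySem.Str.isIn "invalid api key" (PySem.Str.lower (PySem.Str.strip msg)) ||
        (PySem.Str.isIn "api key" (PySem.Str.lower (PySem.Str.strip msg)) &&
         PySem.Str.isIn "invalid" (PySem.Str.lower (PySem.Str.strip msg)))) =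
        (PySem.Str.isIn "api key" (PySem.Str.lower (PySem.Str.strip msg)) &&
         PySem.Str.isIn "invalid" (PySem.Str.lower (PySem.Str.strip msg))) := by
      cases hiakb : PySem.Str.isIn "invalid api key" (PySem.Str.lower (PySem.Str.strip msg))
      · simp
      · have h2 := iak_implies _ hiakb
        rw [h2.1, h2.2]
        rfl
    rw [hb2]
    simp only [List.any_cons, List.any_nil, Bool.or_false]
    split_ifs <;> simp_all
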